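-- pv_equiv track=rewrite | github.com/Sam-Max/plugin.video.jacktook | lib/utils/utils.py | filter_by_quality
-- ===== SOURCE A (Python) =====
-- def filter_by_quality(results):
--     quality_720p = []
--     quality_1080p = []
--     quality_4k = []
--     no_quarlity = []
--
--     for res in results:
--         title = res["title"]
--         if "480p" in title:
--             res["quality"] = "[B][COLOR orange]480p[/COLOR][/B]"
--             quality_720p.append(res)
--         elif "720p" in title:
--             res["quality"] = "[B][COLOR orange]720p[/COLOR][/B]"
--             quality_720p.append(res)
--         elif "1080p" in title:
--             res["quality"] = "[B][COLOR blue]1080p[/COLOR][/B]"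
--             quality_1080p.append(res)
--         elif "2160" in title:
--             res["quality"] = "[B][COLOR yellow]4k[/COLOR][/B]"
--             quality_4k.append(res)
--         else:
--             res["quality"] = "[B][COLOR yellow]N/A[/COLOR][/B]"
--             no_quarlity.append(res)
--
--     combined_list = quality_4k + quality_1080p + quality_720p + no_quarlity
--     return combined_list
-- ===== SOURCE B (Python) =====
-- def filter_by_quality(results):
--     def rank_and_tag(title):
--         if "480p" in title:
--             return 2, "[B][COLOR orange]480p[/COLOR][/B]"
--         if "720p" in title:
--             return 2, "[B][COLOR orange]720p[/COLOR][/B]"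
--         if "1080p" in title:
--             return 1, "[B][COLOR blue]1080p[/COLOR][/B]"
--         if "2160" in title:
--             return 0, "[B][COLOR yellow]4k[/COLOR][/B]"
--         return 3, "[B][COLOR yellow]N/A[/COLOR][/B]"
--
--     ranked = []
--     for res in results:
--         r, q = rank_and_tag(res["title"])
--         res["quality"] = q
--         ranked.append((r, res))
--     ranked.sort(key=lambda t: t[0])
--     return [res for _, res in ranked]
-- ===== Notes on version B (the rewrite author's own statement) =====
-- stated objective: alternative
-- what changed: Replaces the four explicit quality buckets and their concatenation with a single annotate-then-stable-sort pass: each result gets a priority rank (4k=0, 1080p=1, 720p/480p=2, N/A=3) and the list is stably sorted by that rank.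
-- outside the precondition, e.g. on filter_by_quality([{'z': '1'}]): A raises KeyError, B raises KeyError
import Mathlib
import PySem

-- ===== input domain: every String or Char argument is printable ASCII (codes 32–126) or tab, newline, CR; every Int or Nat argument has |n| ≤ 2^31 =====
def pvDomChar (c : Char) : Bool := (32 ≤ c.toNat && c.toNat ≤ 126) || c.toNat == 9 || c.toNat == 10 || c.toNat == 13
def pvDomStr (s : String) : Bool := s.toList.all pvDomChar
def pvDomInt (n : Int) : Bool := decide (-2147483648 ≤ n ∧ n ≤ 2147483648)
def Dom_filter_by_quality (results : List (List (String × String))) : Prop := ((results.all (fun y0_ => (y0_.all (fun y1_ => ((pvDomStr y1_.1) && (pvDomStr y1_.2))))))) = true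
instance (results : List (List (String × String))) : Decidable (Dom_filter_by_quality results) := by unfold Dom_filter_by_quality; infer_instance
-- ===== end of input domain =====

-- B replaces A's four bucket lists and final concatenation by annotating each result
-- with a priority rank and stably sorting by it (objective: alternative decomposition).
-- Both A and B mutate each dict in place (res["quality"] = …); the mutation is identical,
-- the theorems below are about the return value.

-- ===== PORT A =====
def filter_by_quality (results : List (List (String × String))) : List (List (String × String)) :=
  let st := results.foldl
    (fun (acc : List (List (String × String)) × List (List (String × String)) ×
                List (List (String × String)) × List (List (String × String))) res =>
      let q720 := acc.1
      let q1080 := acc.2.1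
      let q4k := acc.2.2.1
      let na := acc.2.2.2
      let title := ((PySem.Dict.mk res).get? "title").getD ""
      if PySem.Str.isIn "480p" title then
        (q720 ++ [((PySem.Dict.mk res).insert "quality" "[B][COLOR orange]480p[/COLOR][/B]").items], q1080, q4k, na)
      else if PySem.Str.isIn "720p" title then
        (q720 ++ [((PySem.Dict.mk res).insert "quality" "[B][COLOR orange]720p[/COLOR][/B]").items], q1080, q4k, na)
      else if PySem.Str.isIn "1080p" title then
        (q720, q1080 ++ [((PySem.Dict.mk res).insert "quality" "[B][COLOR blue]1080p[/COLOR][/B]").items], q4k, na)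
      else if PySem.Str.isIn "2160" title then
        (q720, q1080, q4k ++ [((PySem.Dict.mk res).insert "quality" "[B][COLOR yellow]4k[/COLOR][/B]").items], na)
      else
        (q720, q1080, q4k, na ++ [((PySem.Dict.mk res).insert "quality" "[B][COLOR yellow]N/A[/COLOR][/B]").items]))
    ([], [], [], [])
  st.2.2.1 ++ st.2.1 ++ st.1 ++ st.2.2.2

-- ===== PORT B =====
def rankAndTag (title : String) : Nat × String :=
  if PySem.Str.isIn "480p" title then (2, "[B][COLOR orange]480p[/COLOR][/B]")
  else if PySem.Str.isIn "720p" title then (2, "[B][COLOR orange]720p[/COLOR][/B]")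
  else if PySem.Str.isIn "1080p" title then (1, "[B][COLOR blue]1080p[/COLOR][/B]")
  else if PySem.Str.isIn "2160" title then (0, "[B][COLOR yellow]4k[/COLOR][/B]")
  else (3, "[B][COLOR yellow]N/A[/COLOR][/B]")

def filter_by_quality_alt (results : List (List (String × String))) : List (List (String × String)) :=
  let ranked := results.foldl
    (fun (acc : List (Nat × List (String × String))) res =>
      let rq := rankAndTag (((PySem.Dict.mk res).get? "title").getD "")
      acc ++ [(rq.1, ((PySem.Dict.mk res).insert "quality" rq.2).items)])
    []
  (PySem.List.sorted ranked (fun t => t.1)).map (fun t => t.2)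

-- ===== PRECONDITION & SPEC =====
-- Pre_ excludes (a) dicts missing a "title" key, on which A raises KeyError, and
-- (b) association lists with duplicate keys, which do not encode any Python dict
-- (a dict's keys are unique; on such lists the encoding itself is ambiguous).
def Pre_filter_by_quality (results : List (List (String × String))) : Prop :=
  (results.all (fun res => ((PySem.Dict.mk res).contains "title" && decide (res.map (fun p => p.1)).Nodup))) = true
instance (results : List (List (String × String))) : Decidable (Pre_filter_by_quality results) := by unfold Pre_filter_by_quality; infer_instance
def pvWitness_filter_by_quality : (List (List (String × String))) :=
  [[("title", "some 720p rip")], [("title", "2160 remux"), ("size", "3GB")]]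
def Spec_filter_by_quality (results : List (List (String × String))) (out : List (List (String × String))) : Prop := out = filter_by_quality_alt results
instance (results : List (List (String × String))) (out : List (List (String × String))) : Decidable (Spec_filter_by_quality results out) := by unfold Spec_filter_by_quality; infer_instance

-- ===== CLAIM (what is proved, stated in full; the proofs are below) =====
def Claim_equal_filter_by_quality : Prop := ∀ (results : List (List (String × String))), Dom_filter_by_quality results → Pre_filter_by_quality results → Spec_filter_by_quality results (filter_by_quality results)

-- ===== LEMMAS AND PROOFS =====

-- the annotated item both loops build for one result
def pvTag (res : List (String × String)) : Nat × List (String × String) :=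
  let rq := rankAndTag (((PySem.Dict.mk res).get? "title").getD "")
  (rq.1, ((PySem.Dict.mk res).insert "quality" rq.2).items)

def pvBlocks (l : List (Nat × List (String × String))) : List (Nat × List (String × String)) :=
  l.filter (fun t => t.1 == 0) ++ l.filter (fun t => t.1 == 1) ++
  l.filter (fun t => t.1 == 2) ++ l.filter (fun t => t.1 == 3)

lemma rankAndTag_fst_le (t : String) : (rankAndTag t).1 ≤ 3 := by
  unfold rankAndTag; split_ifs <;> simp

lemma insertBy_all_before {α : Type} (before : α → α → Bool) (x : α) (zs : List α)
    (h : ∀ y ∈ zs, before x y = true) :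
    PySem.List.insertBy before x zs = x :: zs := by
  cases zs with
  | nil => rfl
  | cons y ys => simp [PySem.List.insertBy, h y (by simp)]

lemma insertBy_skip {α : Type} (before : α → α → Bool) (x : α) (ys zs : List α)
    (h : ∀ y ∈ ys, before x y = false) :
    PySem.List.insertBy before x (ys ++ zs) = ys ++ PySem.List.insertBy before x zs := by
  induction ys with
  | nil => rfl
  | cons y t ih =>
      simp [PySem.List.insertBy, h y (by simp)]
      exact ih (fun z hz => h z (by simp [hz]))

-- inserting a rank-r item into the four blocks appends it to block r
lemma insertBy_blocks (x : Nat × List (String × String)) (l : List (Nat × List (String × String)))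
    (hx : x.1 ≤ 3) :
    PySem.List.insertBy (fun a b => decide (a.1 < b.1)) x (pvBlocks l) = pvBlocks (l ++ [x]) := by
  have hf : ∀ (k : Nat) y, y ∈ l.filter (fun t => t.1 == k) → y.1 = k := by
    intro k y hy
    have := List.of_mem_filter hy
    simpa using this
  unfold pvBlocks
  simp only [List.filter_append, List.filter_cons, List.filter_nil]
  interval_cases h : x.1
  · -- rank 0 : skip block 0 (stability), insert before blocks 1, 2, 3
    rw [show (List.filter (fun t => t.1 == 0) l ++ List.filter (fun t => t.1 == 1) l ++
          List.filter (fun t => t.1 == 2) l ++ List.filter (fun t => t.1 == 3) l)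
        = List.filter (fun t => t.1 == 0) l ++
          (List.filter (fun t => t.1 == 1) l ++
           (List.filter (fun t => t.1 == 2) l ++ List.filter (fun t => t.1 == 3) l)) by
        simp [List.append_assoc]]
    rw [insertBy_skip _ _ _ _ (by
        intro y hy
        simp [hf _ _ hy, h])]
    rw [insertBy_all_before _ _ _ (by
        intro y hy
        simp only [List.mem_append] at hy
        rcases hy with hy | hy | hy <;> simp [hf _ _ hy, h])]
    simp [List.append_assoc]
  · -- rank 1 : skip block 0, insert before blocks 2 and 3
    rw [show (List.filter (fun t => t.1 == 0) l ++ List.filter (fun t => t.1 == 1) l ++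
          List.filter (fun t => t.1 == 2) l ++ List.filter (fun t => t.1 == 3) l)
        = (List.filter (fun t => t.1 == 0) l ++ List.filter (fun t => t.1 == 1) l) ++
          (List.filter (fun t => t.1 == 2) l ++ List.filter (fun t => t.1 == 3) l) by
        simp [List.append_assoc]]
    rw [insertBy_skip _ _ _ _ (by
        intro y hy
        simp only [List.mem_append] at hy
        rcases hy with hy | hy <;> simp [hf _ _ hy, h])]
    rw [insertBy_all_before _ _ _ (by
        intro y hy
        simp only [List.mem_append] at hy
        rcases hy with hy | hy <;> simp [hf _ _ hy, h])]
    simp [List.append_assoc]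
  · -- rank 2 : skip blocks 0 and 1, insert before block 3
    rw [show (List.filter (fun t => t.1 == 0) l ++ List.filter (fun t => t.1 == 1) l ++
          List.filter (fun t => t.1 == 2) l ++ List.filter (fun t => t.1 == 3) l)
        = (List.filter (fun t => t.1 == 0) l ++ List.filter (fun t => t.1 == 1) l ++
           List.filter (fun t => t.1 == 2) l) ++ List.filter (fun t => t.1 == 3) l by
        simp [List.append_assoc]]
    rw [insertBy_skip _ _ _ _ (by
        intro y hy
        simp only [List.append_assoc, List.mem_append] at hy
        rcases hy with hy | hy | hy <;> simp [hf _ _ hy, h])]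
    rw [insertBy_all_before _ _ _ (by
        intro y hy
        simp [hf _ _ hy, h])]
    simp [List.append_assoc]
  · -- rank 3 : x goes after everything
    rw [PySem.List.insertBy_of_forall_not_before _ _ _ (by
        intro y hy
        simp only [List.append_assoc, List.mem_append] at hy
        rcases hy with hy | hy | hy | hy <;> simp [hf _ _ hy, h])]
    simp [List.append_assoc]

lemma sorted_eq_blocks (l : List (Nat × List (String × String)))
    (h : ∀ t ∈ l, t.1 ≤ 3) :
    PySem.List.sorted l (fun t => t.1) = pvBlocks l := by
  induction l using List.reverseRecOn with
  | nil => rfl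
  | append_singleton t x ih =>
      rw [PySem.List.sorted_eq_foldl_insertBy, List.foldl_append]
      simp only [List.foldl_cons, List.foldl_nil]
      rw [← PySem.List.sorted_eq_foldl_insertBy,
          ih (fun y hy => h y (by simp [hy])),
          insertBy_blocks x t (h x (by simp))]

-- A's fold, with the accumulator generalized
lemma foldA_eq (l : List (List (String × String)))
    (a : List (List (String × String)) × List (List (String × String)) ×
         List (List (String × String)) × List (List (String × String))) :
    l.foldl
      (fun acc res =>
        let q720 := acc.1
        let q1080 := acc.2.1
        let q4k := acc.2.2.1
        let na := acc.2.2.2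
        let title := ((PySem.Dict.mk res).get? "title").getD ""
        if PySem.Str.isIn "480p" title then
          (q720 ++ [((PySem.Dict.mk res).insert "quality" "[B][COLOR orange]480p[/COLOR][/B]").items], q1080, q4k, na)
        else if PySem.Str.isIn "720p" title then
          (q720 ++ [((PySem.Dict.mk res).insert "quality" "[B][COLOR orange]720p[/COLOR][/B]").items], q1080, q4k, na)
        else if PySem.Str.isIn "1080p" title then
          (q720, q1080 ++ [((PySem.Dict.mk res).insert "quality" "[B][COLOR blue]1080p[/COLOR][/B]").items], q4k, na)
        else if PySem.Str.isIn "2160" title then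
          (q720, q1080, q4k ++ [((PySem.Dict.mk res).insert "quality" "[B][COLOR yellow]4k[/COLOR][/B]").items], na)
        else
          (q720, q1080, q4k, na ++ [((PySem.Dict.mk res).insert "quality" "[B][COLOR yellow]N/A[/COLOR][/B]").items])) a
    = (a.1 ++ ((l.map pvTag).filter (fun t => t.1 == 2)).map (fun t => t.2),
       a.2.1 ++ ((l.map pvTag).filter (fun t => t.1 == 1)).map (fun t => t.2),
       a.2.2.1 ++ ((l.map pvTag).filter (fun t => t.1 == 0)).map (fun t => t.2),
       a.2.2.2 ++ ((l.map pvTag).filter (fun t => t.1 == 3)).map (fun t => t.2)) := by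
  induction l generalizing a with
  | nil => simp
  | cons res t ih =>
      rw [List.foldl_cons]
      dsimp only
      split_ifs <;> rw [ih] <;> clear ih <;>
        simp_all [pvTag, rankAndTag, List.append_assoc]

-- B's fold is a map
lemma foldB_eq (l : List (List (String × String))) :
    l.foldl
      (fun (acc : List (Nat × List (String × String))) res =>
        let rq := rankAndTag (((PySem.Dict.mk res).get? "title").getD "")
        acc ++ [(rq.1, ((PySem.Dict.mk res).insert "quality" rq.2).items)]) []
    = l.map pvTag := by
  have := PySem.List.foldl_append_singleton_eq_map
    (fun res =>
      let rq := rankAndTag (((PySem.Dict.mk res).get? "title").getD "")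
      (rq.1, ((PySem.Dict.mk res).insert "quality" rq.2).items)) l []
  simpa [pvTag] using this

-- ===== VERDICT (by name: the statement is the Claim_ definition above) =====
theorem filter_by_quality_spec : Claim_equal_filter_by_quality := by
  intro results _ _
  unfold Spec_filter_by_quality filter_by_quality filter_by_quality_alt
  rw [foldB_eq, foldA_eq]
  dsimp only
  rw [sorted_eq_blocks (results.map pvTag)
        (by intro t ht
            simp only [List.mem_map] at ht
            obtain ⟨res, _, rfl⟩ := ht
            exact rankAndTag_fst_le _)]
  unfold pvBlocks
  simp [List.map_append]
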